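-- pv_equiv track=rewrite | github.com/hdurrani1107/DBS_repo | HW6/wedding_examples/wedding4.py | wed
-- ===== SOURCE A (Python) =====
-- def wed(guest_num, circular=True):
--     if guest_num == 0:
--         return []
--     if guest_num == 1:
--         return [[0]]
--     if guest_num == 2:
--         return [[0,1],[1,0]]
--
--     res = []
--
--     def sub(current, persons):
--         if persons == guest_num:
--             res.append(current)
--             return
--         for offset in (-1, 0, +1):
--             if circular:
--                 newpos = (persons + offset) % guest_num
--             else:
--                 newpos = (persons + offset)
--             if newpos < 0 or newpos >= guest_num:
--                 continue
--             if current[newpos] is None: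
--                 newcurrent = current[:]
--                 newcurrent[newpos] = persons
--                 sub(newcurrent, persons + 1)
--
--     sub([None]*guest_num, 0)
--     return res
-- ===== SOURCE B (Python) =====
-- def wed(guest_num, circular=True):
--     if guest_num == 0:
--         return []
--     if guest_num == 1:
--         return [[0]]
--     if guest_num == 2:
--         return [[0, 1], [1, 0]]
--
--     res = []
--     stack = [([None] * guest_num, 0)]
--     while stack:
--         current, persons = stack.pop()
--         if persons == guest_num:
--             res.append(current)
--             continue
--         # push children in reversed offset order so the LIFO pop
--         # visits offsets -1, 0, +1 like a left-to-right DFS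
--         for offset in (1, 0, -1):
--             if circular:
--                 newpos = (persons + offset) % guest_num
--             else:
--                 newpos = persons + offset
--             if newpos < 0 or newpos >= guest_num:
--                 continue
--             if current[newpos] is None:
--                 child = current[:]
--                 child[newpos] = persons
--                 stack.append((child, persons + 1))
--     return res
-- ===== Notes on version B (the rewrite author's own statement) =====
-- stated objective: alternative
-- what changed: Replaces A's nested-function recursive backtracking with an explicit stack-based iterative DFS (children pushed in reversed offset order so the LIFO pop reproduces A's -1,0,+1 visit order).
import Mathlib
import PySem

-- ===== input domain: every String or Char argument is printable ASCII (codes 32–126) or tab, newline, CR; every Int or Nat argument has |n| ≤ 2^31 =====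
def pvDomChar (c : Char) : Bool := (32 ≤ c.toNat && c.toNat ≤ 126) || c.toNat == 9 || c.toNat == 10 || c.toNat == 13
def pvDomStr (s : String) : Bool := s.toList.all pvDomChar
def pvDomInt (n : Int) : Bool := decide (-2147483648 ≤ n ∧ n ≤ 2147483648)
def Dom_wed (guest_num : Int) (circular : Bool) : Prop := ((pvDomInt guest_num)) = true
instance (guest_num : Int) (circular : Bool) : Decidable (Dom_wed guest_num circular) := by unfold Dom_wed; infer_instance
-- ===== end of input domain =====

-- B replaces A's recursive backtracking with an explicit stack-based DFS
-- (children pushed in reversed offset order); same results, same cost.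

-- ===== PORT A =====
-- Recursive helper `sub`. The Nat argument is fuel making the recursion structural;
-- each recursive call fills one `none` slot, so fuel = (number of none slots) + 1
-- at the top call never runs out (proved implicitly by the equivalence proof).
def wedSub (g : Int) (c : Bool) : Nat → List (Option Int) → Int → List (List Int) → List (List Int)
  | 0, _, _, res => res
  | f+1, cur, p, res =>
    if p = g then res ++ [cur.map (fun o => o.getD 0)]
    else
      -- offset -1
      let np1 : Int := if c then PySem.Int.mod (p + (-1)) g else p + (-1)
      let r1 := if np1 < 0 ∨ g ≤ np1 then res else
        match cur[np1.toNat]? with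
        | some none => wedSub g c f (cur.set np1.toNat (some p)) (p+1) res
        | _ => res
      -- offset 0
      let np2 : Int := if c then PySem.Int.mod (p + 0) g else p + 0
      let r2 := if np2 < 0 ∨ g ≤ np2 then r1 else
        match cur[np2.toNat]? with
        | some none => wedSub g c f (cur.set np2.toNat (some p)) (p+1) r1
        | _ => r1
      -- offset +1
      let np3 : Int := if c then PySem.Int.mod (p + 1) g else p + 1
      if np3 < 0 ∨ g ≤ np3 then r2 else
        match cur[np3.toNat]? with
        | some none => wedSub g c f (cur.set np3.toNat (some p)) (p+1) r2
        | _ => r2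

def wed (guest_num : Int) (circular : Bool) : List (List Int) :=
  if guest_num = 0 then []
  else if guest_num = 1 then [[0]]
  else if guest_num = 2 then [[0,1],[1,0]]
  else wedSub guest_num circular (guest_num.toNat + 1)
         (List.replicate guest_num.toNat none) 0 []

-- ===== PORT B =====
-- one `stack.append` of B's inner for-loop (head of the list = top of the stack)
def wedPush (g : Int) (c : Bool) (cur : List (Option Int)) (p off : Int)
    (stack : List (List (Option Int) × Int)) : List (List (Option Int) × Int) :=
  let np : Int := if c then PySem.Int.mod (p + off) g else p + off
  if np < 0 ∨ g ≤ np then stack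
  else
    match cur[np.toNat]? with
    | some none => (cur.set np.toNat (some p), p+1) :: stack
    | _ => stack

-- B's while loop. The Nat fuel bounds the number of iterations; 3^(g.toNat+1)
-- at the top call is never exhausted (each stack node costs < 3^(slots+1)).
def wedLoop (g : Int) (c : Bool) : Nat → List (List (Option Int) × Int) → List (List Int) → List (List Int)
  | 0, _, res => res
  | _+1, [], res => res
  | f+1, (cur, p) :: rest, res =>
    if p = g then wedLoop g c f rest (res ++ [cur.map (fun o => o.getD 0)])
    else wedLoop g c f
      (wedPush g c cur p (-1) (wedPush g c cur p 0 (wedPush g c cur p 1 rest))) res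

def wed_alt (guest_num : Int) (circular : Bool) : List (List Int) :=
  if guest_num = 0 then []
  else if guest_num = 1 then [[0]]
  else if guest_num = 2 then [[0,1],[1,0]]
  else wedLoop guest_num circular (3 ^ (guest_num.toNat + 1))
         [(List.replicate guest_num.toNat none, 0)] []

-- ===== PRECONDITION & SPEC =====
def Spec_wed (guest_num : Int) (circular : Bool) (out : List (List Int)) : Prop := out = wed_alt guest_num circular
instance (guest_num : Int) (circular : Bool) (out : List (List Int)) : Decidable (Spec_wed guest_num circular out) := by unfold Spec_wed; infer_instance

-- ===== CLAIM (what is proved, stated in full; the proofs are below) =====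
def Claim_equal_wed : Prop := ∀ (guest_num : Int) (circular : Bool), Dom_wed guest_num circular → Spec_wed guest_num circular (wed guest_num circular)

-- ===== LEMMAS AND PROOFS =====

-- number of empty (none) slots
def wedNN (cur : List (Option Int)) : Nat := cur.countP (fun o => o.isNone)

-- cost of one stack node: bounds the loop iterations needed to exhaust it
def wedCost (cur : List (Option Int)) : Nat := 3 ^ (wedNN cur + 1) - 1

def wedStackCost (s : List (List (Option Int) × Int)) : Nat :=
  (s.map (fun t => wedCost t.1)).sum

-- the fold step: run A's sub on a popped node with exact fuel
def wedF (g : Int) (c : Bool) (r : List (List Int)) (t : List (Option Int) × Int) : List (List Int) :=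
  wedSub g c (wedNN t.1 + 1) t.1 t.2 r

-- setting a none slot to some decreases the none count by exactly one
theorem wedNN_set (cur : List (Option Int)) (i : Nat) (v : Int)
    (h : cur[i]? = some none) :
    wedNN (cur.set i (some v)) + 1 = wedNN cur := by
  induction cur generalizing i with
  | nil => simp at h
  | cons a t ih =>
    cases i with
    | zero =>
      simp at h; subst h
      simp [wedNN, List.countP_cons]
    | succ j =>
      simp at h
      have := ih j h
      simp [wedNN, List.countP_cons] at *
      omega

-- one A-side offset step, at fuel f
def wedStepA (g : Int) (c : Bool) (f : Nat) (cur : List (Option Int)) (p off : Int)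
    (r : List (List Int)) : List (List Int) :=
  let np : Int := if c then PySem.Int.mod (p + off) g else p + off
  if np < 0 ∨ g ≤ np then r else
    match cur[np.toNat]? with
    | some none => wedSub g c f (cur.set np.toNat (some p)) (p+1) r
    | _ => r

theorem wedSub_succ (g : Int) (c : Bool) (f : Nat) (cur : List (Option Int)) (p : Int)
    (res : List (List Int)) (h : p ≠ g) :
    wedSub g c (f+1) cur p res =
      wedStepA g c f cur p 1 (wedStepA g c f cur p 0 (wedStepA g c f cur p (-1) res)) := by
  simp [wedSub, wedStepA, h]

-- folding wedF over a pushed stack = one A-side step then folding the rest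
theorem wedPush_foldl (g : Int) (c : Bool) (cur : List (Option Int)) (p off : Int)
    (rest : List (List (Option Int) × Int)) (r : List (List Int)) :
    List.foldl (wedF g c) r (wedPush g c cur p off rest) =
      List.foldl (wedF g c) (wedStepA g c (wedNN cur) cur p off r) rest := by
  unfold wedPush wedStepA
  by_cases hg : (if c then PySem.Int.mod (p + off) g else p + off) < 0 ∨
      g ≤ (if c then PySem.Int.mod (p + off) g else p + off)
  · simp [hg]
  · simp only [hg, if_neg, if_false]
    cases hx : cur[((if c then PySem.Int.mod (p + off) g else p + off)).toNat]? with
    | none => simp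
    | some o =>
      cases o with
      | none =>
        simp [List.foldl_cons, wedF, wedNN_set _ _ p hx]
      | some v => simp

-- pushing costs at most 3^(nn cur) - 1
theorem wedPush_cost (g : Int) (c : Bool) (cur : List (Option Int)) (p off : Int)
    (rest : List (List (Option Int) × Int)) :
    wedStackCost (wedPush g c cur p off rest) ≤ (3 ^ wedNN cur - 1) + wedStackCost rest := by
  unfold wedPush
  by_cases hg : (if c then PySem.Int.mod (p + off) g else p + off) < 0 ∨
      g ≤ (if c then PySem.Int.mod (p + off) g else p + off)
  · simp [hg]
  · simp only [hg, if_neg, if_false]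
    cases hx : cur[((if c then PySem.Int.mod (p + off) g else p + off)).toNat]? with
    | none => simp
    | some o =>
      cases o with
      | none =>
        have h1 := wedNN_set cur ((if c then PySem.Int.mod (p + off) g else p + off)).toNat p hx
        have h2 : wedCost (cur.set ((if c then PySem.Int.mod (p + off) g else p + off)).toNat (some p)) = 3 ^ wedNN cur - 1 := by
          unfold wedCost; rw [h1]
        simp [wedStackCost, h2]
      | some v => simp

theorem wedCost_pos (cur : List (Option Int)) : 2 ≤ wedCost cur := by
  unfold wedCost
  have : 3 ^ 1 ≤ 3 ^ (wedNN cur + 1) := Nat.pow_le_pow_right (by norm_num) (by omega)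
  omega

-- main invariant: with enough fuel, B's loop folds A's sub over the stack
theorem wedLoop_foldl (g : Int) (c : Bool) :
    ∀ (n : Nat) (stack : List (List (Option Int) × Int)) (res : List (List Int)),
      wedStackCost stack ≤ n →
      wedLoop g c n stack res = List.foldl (wedF g c) res stack := by
  intro n
  induction n with
  | zero =>
    intro stack res h
    cases stack with
    | nil => simp [wedLoop]
    | cons t rest =>
      exfalso
      have := wedCost_pos t.1
      simp [wedStackCost] at h
      omega
  | succ m ih =>
    intro stack res h
    cases stack with
    | nil => simp [wedLoop]
    | cons t rest =>
      obtain ⟨cur, p⟩ := t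
      have hc := wedCost_pos cur
      have hrest : wedStackCost rest ≤ m := by
        simp [wedStackCost] at h ⊢; omega
      by_cases hp : p = g
      · subst hp
        simp only [wedLoop, if_pos rfl]
        rw [ih rest _ hrest]
        simp [wedF, wedSub]
      · simp only [wedLoop, if_neg hp]
        have hchild : wedStackCost
            (wedPush g c cur p (-1) (wedPush g c cur p 0 (wedPush g c cur p 1 rest))) ≤ m := by
          have h1 := wedPush_cost g c cur p 1 rest
          have h2 := wedPush_cost g c cur p 0 (wedPush g c cur p 1 rest)
          have h3 := wedPush_cost g c cur p (-1) (wedPush g c cur p 0 (wedPush g c cur p 1 rest))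
          have hpow : wedCost cur = 3 ^ (wedNN cur + 1) - 1 := rfl
          have hpow3 : 3 ^ (wedNN cur + 1) = 3 * 3 ^ (wedNN cur) := by ring
          have h0 : 1 ≤ 3 ^ (wedNN cur) := Nat.one_le_pow _ _ (by norm_num)
          simp [wedStackCost] at h hrest h1 h2 h3 ⊢
          omega
        rw [ih _ _ hchild]
        rw [wedPush_foldl, wedPush_foldl, wedPush_foldl]
        rw [List.foldl_cons]
        congr 1
        rw [wedF, wedSub_succ g c (wedNN cur) cur p res hp]

theorem wedNN_replicate (n : Nat) : wedNN (List.replicate n (none : Option Int)) = n := by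
  simp [wedNN, List.countP_replicate, Option.isNone]

-- ===== VERDICT (by name: the statement is the Claim_ definition above) =====
theorem wed_spec : Claim_equal_wed := by
  intro g c _
  unfold Spec_wed wed wed_alt
  by_cases h0 : g = 0
  · simp [h0]
  by_cases h1 : g = 1
  · simp [h0, h1]
  by_cases h2 : g = 2
  · simp [h0, h1, h2]
  simp only [h0, h1, h2, if_false]
  have hcost : wedStackCost [(List.replicate g.toNat (none : Option Int), 0)] ≤ 3 ^ (g.toNat + 1) := by
    simp [wedStackCost, wedCost, wedNN_replicate]
  rw [wedLoop_foldl g c _ _ _ hcost]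
  simp [wedF, wedNN_replicate]
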